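-- pv_equiv track=rewrite | github.com/athulya24453/math_algorithms | CSES_Problems/commonDivisors.py | max_gcd
-- ===== SOURCE A (Python) =====
-- def max_gcd(l: list) -> int:
--     m = max(l)
--     ans = 1
--
--     for i in range(2,m+1):
--         for j in range(len(l)):
--             for k in range(j+1, len(l)):
--                 if l[j]%i == 0 and l[k]%i == 0:
--                     ans = i
--
--     return ans
-- ===== SOURCE B (Python) =====
-- def max_gcd(l: list) -> int:
--     i = max(l)
--     while i >= 2:
--         if sum(x % i == 0 for x in l) >= 2:
--             return i
--         i -= 1
--     return 1
-- ===== Notes on version B (the rewrite author's own statement) =====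
-- stated objective: faster
-- what changed: Replaced the triple loop (every candidate divisor times every index pair) by a descending scan from max(l) that counts divisible elements in one pass and returns at the first divisor shared by at least two elements.
-- outside the precondition, e.g. on max_gcd([]): A raises ValueError, B raises ValueError
import Mathlib
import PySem

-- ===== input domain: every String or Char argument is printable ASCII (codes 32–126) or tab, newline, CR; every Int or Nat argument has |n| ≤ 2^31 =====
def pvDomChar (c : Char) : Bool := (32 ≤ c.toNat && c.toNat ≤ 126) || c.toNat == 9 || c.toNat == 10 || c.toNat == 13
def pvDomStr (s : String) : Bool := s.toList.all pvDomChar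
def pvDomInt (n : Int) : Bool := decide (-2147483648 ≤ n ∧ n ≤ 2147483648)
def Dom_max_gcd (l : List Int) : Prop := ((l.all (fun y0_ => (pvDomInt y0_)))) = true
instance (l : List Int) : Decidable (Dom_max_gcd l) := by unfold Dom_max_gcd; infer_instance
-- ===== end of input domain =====

-- B replaces A's triple loop by a descending scan from max(l) counting divisible
-- elements once per candidate, returning at the first divisor shared by ≥ 2 elements (objective: faster).

-- ===== PORT A =====
def max_gcd (l : List Int) : Int :=
  let m := (PySem.List.max? l (fun x => x)).getD 0
  (PySem.List.pyRange 2 (m + 1) 1).foldl (fun ans i =>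
    (PySem.List.pyRange 0 (l.length : Int) 1).foldl (fun ans j =>
      (PySem.List.pyRange (j + 1) (l.length : Int) 1).foldl (fun ans k =>
        if PySem.Int.mod (PySem.List.pyGetD l j 0) i == 0 &&
           PySem.Int.mod (PySem.List.pyGetD l k 0) i == 0 then i else ans) ans) ans) 1

-- ===== PORT B =====
-- the one-pass count 'sum(x % i == 0 for x in l)' is List.countP of the divisibility test
def altCount (l : List Int) (i : Int) : Nat :=
  l.countP (fun x => PySem.Int.mod x i == 0)

def altLoop (l : List Int) (i : Int) : Int :=
  if 2 ≤ i then
    if 2 ≤ altCount l i then i else altLoop l (i - 1)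
  else 1
termination_by i.toNat
decreasing_by omega

def max_gcd_alt (l : List Int) : Int :=
  altLoop l ((PySem.List.max? l (fun x => x)).getD 0)

-- ===== PRECONDITION & SPEC =====
-- Pre_ excludes only the empty list, on which Python's max(l) raises ValueError (in both A and B).
def Pre_max_gcd (l : List Int) : Prop := l ≠ []
instance (l : List Int) : Decidable (Pre_max_gcd l) := by unfold Pre_max_gcd; infer_instance
def pvWitness_max_gcd : List Int := [6, 4]

def Spec_max_gcd (l : List Int) (out : Int) : Prop := out = max_gcd_alt l
instance (l : List Int) (out : Int) : Decidable (Spec_max_gcd l out) := by unfold Spec_max_gcd; infer_instance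

-- ===== CLAIM (what is proved, stated in full; the proofs are below) =====
def Claim_equal_max_gcd : Prop := ∀ (l : List Int), Dom_max_gcd l → Pre_max_gcd l → Spec_max_gcd l (max_gcd l)

-- ===== LEMMAS AND PROOFS =====

-- a fold that overwrites the accumulator with v whenever q holds is 'if any then v else init'
theorem foldl_overwrite_if (r : List Int) (q : Int → Bool) (v a : Int) :
    r.foldl (fun acc x => if q x then v else acc) a = if r.any q then v else a := by
  induction r generalizing a with
  | nil => simp
  | cons x xs ih => cases hq : q x <;> simp [List.foldl_cons, hq, ih]

-- the Bool test of A's inner loops: some index pair (j, k), j < k, both entries divisible by i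
def pairAny (l : List Int) (i : Int) : Bool :=
  (PySem.List.pyRange 0 (l.length : Int) 1).any (fun j =>
    (PySem.List.pyRange (j + 1) (l.length : Int) 1).any (fun k =>
      PySem.Int.mod (PySem.List.pyGetD l j 0) i == 0 &&
      PySem.Int.mod (PySem.List.pyGetD l k 0) i == 0))

theorem double_fold_eq (l : List Int) (i ans : Int) :
    (PySem.List.pyRange 0 (l.length : Int) 1).foldl (fun ans j =>
      (PySem.List.pyRange (j + 1) (l.length : Int) 1).foldl (fun ans k =>
        if PySem.Int.mod (PySem.List.pyGetD l j 0) i == 0 &&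
           PySem.Int.mod (PySem.List.pyGetD l k 0) i == 0 then i else ans) ans) ans
    = if pairAny l i then i else ans := by
  have h : ∀ (a j : Int),
      (PySem.List.pyRange (j + 1) (l.length : Int) 1).foldl (fun ans k =>
        if PySem.Int.mod (PySem.List.pyGetD l j 0) i == 0 &&
           PySem.Int.mod (PySem.List.pyGetD l k 0) i == 0 then i else ans) a
      = if (PySem.List.pyRange (j + 1) (l.length : Int) 1).any (fun k =>
          PySem.Int.mod (PySem.List.pyGetD l j 0) i == 0 &&
          PySem.Int.mod (PySem.List.pyGetD l k 0) i == 0) then i else a := by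
    intro a j
    exact foldl_overwrite_if _ _ _ _
  simp only [h]
  exact foldl_overwrite_if _ _ _ _

-- counting at least two satisfying elements ↔ a pair of positions j < k both satisfying
theorem two_le_countP_iff (q : Int → Bool) (l : List Int) :
    2 ≤ l.countP q ↔ ∃ j k : Nat, j < k ∧ k < l.length ∧ q (l.getD j 0) ∧ q (l.getD k 0) := by
  induction l with
  | nil => simp
  | cons x xs ih =>
    rw [List.countP_cons]
    cases hx : q x with
    | true =>
      simp only [if_true]
      constructor
      · intro h
        have h1 : 0 < xs.countP q := by omega
        rw [List.countP_pos_iff] at h1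
        obtain ⟨a, ha, hqa⟩ := h1
        obtain ⟨n, hn, rfl⟩ := List.mem_iff_getElem.mp ha
        refine ⟨0, n + 1, Nat.succ_pos n, by simp [hn], by simpa [List.getD_cons_zero], ?_⟩
        rw [List.getD_cons_succ, List.getD_eq_getElem _ _ hn]
        exact hqa
      · rintro ⟨j, k, hjk, hk, hqj, hqk⟩
        obtain ⟨k', rfl⟩ : ∃ k', k = k' + 1 := ⟨k - 1, by omega⟩
        rw [List.getD_cons_succ] at hqk
        have hk' : k' < xs.length := by simp at hk; omega
        have : 0 < xs.countP q := List.countP_pos_iff.mpr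
          ⟨xs.getD k' 0, by rw [List.getD_eq_getElem _ _ hk']; exact List.getElem_mem hk', hqk⟩
        omega
    | false =>
      simp only [Bool.false_eq_true, if_false, Nat.add_zero]
      rw [ih]
      constructor
      · rintro ⟨j, k, hjk, hk, hqj, hqk⟩
        exact ⟨j + 1, k + 1, by omega, by simp; omega,
          by simpa [List.getD_cons_succ], by simpa [List.getD_cons_succ]⟩
      · rintro ⟨j, k, hjk, hk, hqj, hqk⟩
        obtain ⟨j', rfl⟩ : ∃ j', j = j' + 1 := by
          cases j with
          | zero => rw [List.getD_cons_zero, hx] at hqj; exact absurd hqj (by simp)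
          | succ j' => exact ⟨j', rfl⟩
        obtain ⟨k', rfl⟩ : ∃ k', k = k' + 1 := ⟨k - 1, by omega⟩
        rw [List.getD_cons_succ] at hqj hqk
        exact ⟨j', k', by omega, by simp at hk; omega, hqj, hqk⟩

theorem pairAny_iff (l : List Int) (i : Int) :
    pairAny l i = true ↔ 2 ≤ altCount l i := by
  unfold pairAny altCount
  rw [two_le_countP_iff]
  simp only [List.any_eq_true, PySem.List.mem_pyRange_one, Bool.and_eq_true]
  constructor
  · rintro ⟨j, ⟨hj0, hjl⟩, k, ⟨hk1, hkl⟩, hqj, hqk⟩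
    refine ⟨j.toNat, k.toNat, by omega, by omega, ?_, ?_⟩
    · rw [List.getD_eq_getElem _ _ (show j.toNat < l.length by omega)]
      rwa [PySem.List.pyGetD_eq_getElem l 0 hj0 hjl] at hqj
    · rw [List.getD_eq_getElem _ _ (show k.toNat < l.length by omega)]
      rwa [PySem.List.pyGetD_eq_getElem l 0 (by omega) hkl] at hqk
  · rintro ⟨j, k, hjk, hkl, hqj, hqk⟩
    refine ⟨(j : Int), ⟨by omega, by omega⟩, (k : Int), ⟨by omega, by omega⟩, ?_, ?_⟩
    · rw [PySem.List.pyGetD_natCast]; exact hqj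
    · rw [PySem.List.pyGetD_natCast]; exact hqk

-- A's outer ascending fold (keep the last hit) equals B's descending early-exit loop
theorem outer_fold_eq (l : List Int) (m : Int) :
    (PySem.List.pyRange 2 (m + 1) 1).foldl (fun ans i => if pairAny l i then i else ans) 1
    = altLoop l m := by
  rw [altLoop]
  by_cases hm : 2 ≤ m
  · rw [if_pos hm]
    have hsplit : PySem.List.pyRange 2 (m + 1) 1 = PySem.List.pyRange 2 m 1 ++ [m] :=
      PySem.List.pyRange_one_succ_right hm
    rw [hsplit, List.foldl_append, List.foldl_cons, List.foldl_nil]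
    have hrec := outer_fold_eq l (m - 1)
    rw [show m - 1 + 1 = m from by ring] at hrec
    rw [hrec]
    by_cases hp : 2 ≤ altCount l m
    · rw [(pairAny_iff l m).mpr hp, if_pos hp]
      simp
    · have hfalse : pairAny l m = false :=
        Bool.eq_false_iff.mpr (fun h => hp ((pairAny_iff l m).mp h))
      rw [hfalse, if_neg hp]
      simp
  · rw [if_neg hm, PySem.List.pyRange_one_eq_nil (by omega), List.foldl_nil]
termination_by m.toNat
decreasing_by omega

-- ===== VERDICT (by name: the statement is the Claim_ definition above) =====
theorem max_gcd_spec : Claim_equal_max_gcd := by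
  intro l _ _
  unfold Spec_max_gcd max_gcd max_gcd_alt
  simp only [double_fold_eq]
  exact outer_fold_eq l _
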